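-- pv_equiv track=rewrite | github.com/hesthers/self-python-practice | baekjoon/bj_alg17.py | choose_3
-- ===== SOURCE A (Python) =====
-- def choose_3(arr):
--     answer = []; max_sum = 0
--     for i in range(len(arr) - 1):
--         l = i + 1
--
--         while True:
--             r = len(arr) - 1
--             if l == r: break
--             while True:
--                 if l == r: break
--                 card_arr = [arr[i], arr[l], arr[r]]
--                 if card_arr in answer: pass
--                 else: answer.append(card_arr)
--                 r -= 1
--             l += 1
--
--         for a in answer:
--             max_sum = max(sum(a)%10, max_sum)
--
--     return max_sum
-- ===== SOURCE B (Python) =====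
-- def choose_3(arr):
--     cnt = {}
--     for x in arr:
--         cnt[x % 10] = cnt.get(x % 10, 0) + 1
--     best = 0
--     for r1 in range(10):
--         for r2 in range(r1, 10):
--             for r3 in range(r2, 10):
--                 rs = [r1, r2, r3]
--                 if all(cnt.get(q, 0) >= rs.count(q) for q in rs):
--                     best = max(best, (r1 + r2 + r3) % 10)
--     return best
-- ===== Notes on version B (the rewrite author's own statement) =====
-- stated objective: faster
-- what changed: Instead of materialising every index triple into a dedup list (with a linear membership scan per triple) and repeatedly re-scanning it for the max, B counts cards per residue mod 10 once and takes the max of (r1+r2+r3)%10 over the at most 220 feasible sorted residue triples.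
import Mathlib
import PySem

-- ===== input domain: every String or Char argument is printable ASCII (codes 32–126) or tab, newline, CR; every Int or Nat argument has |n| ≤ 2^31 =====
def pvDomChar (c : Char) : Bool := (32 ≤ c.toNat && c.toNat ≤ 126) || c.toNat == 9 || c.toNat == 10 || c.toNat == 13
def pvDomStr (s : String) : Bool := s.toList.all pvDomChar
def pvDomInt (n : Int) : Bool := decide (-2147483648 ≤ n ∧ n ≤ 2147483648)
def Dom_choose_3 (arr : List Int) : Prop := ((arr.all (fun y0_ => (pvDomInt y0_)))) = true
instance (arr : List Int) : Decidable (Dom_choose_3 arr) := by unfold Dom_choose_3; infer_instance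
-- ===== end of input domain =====

-- B replaces A's scheme (enumerate every index triple into a dedup list, rescanning it for
-- membership and for the running max) by one residue count mod 10 plus a max over the
-- feasible sorted residue triples (objective: faster; measured asymptotic speed-up).

-- ===== PORT A =====
-- arr[i]: every index A uses satisfies 0 ≤ index < len arr, so pyGet? never returns
-- none (no IndexError) and '.getD 0' is exact.
def pvElem (arr : List Int) (i : Int) : Int := (PySem.List.pyGet? arr i).getD 0

def pvTriple (arr : List Int) (i l r : Int) : List Int :=
  [pvElem arr i, pvElem arr l, pvElem arr r]

-- inner 'while True': r counts down from len-1 until it meets l; the Nat fuel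
-- (r - l).toNat is exactly the number of iterations Python performs — a pure
-- totality guard, the loop never exhausts it early.
def pvInnerGo (arr : List Int) (i l : Int) : Nat → Int → List (List Int) → List (List Int)
  | 0, _, answer => answer
  | fuel + 1, r, answer =>
      if l = r then answer
      else pvInnerGo arr i l fuel (r - 1)
        (if pvTriple arr i l r ∈ answer then answer else answer ++ [pvTriple arr i l r])

def pvInner (arr : List Int) (i l r : Int) (answer : List (List Int)) : List (List Int) :=
  pvInnerGo arr i l (r - l).toNat r answer

-- outer 'while True': l counts up until it meets len-1 (r is reset to len-1 each
-- pass); fuel (len-1-l).toNat is again exactly Python's iteration count.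
def pvOuterGo (arr : List Int) (i : Int) : Nat → Int → List (List Int) → List (List Int)
  | 0, _, answer => answer
  | fuel + 1, l, answer =>
      if l = PySem.List.len arr - 1 then answer
      else pvOuterGo arr i fuel (l + 1)
        (pvInner arr i l (PySem.List.len arr - 1) answer)

def pvOuter (arr : List Int) (i l : Int) (answer : List (List Int)) : List (List Int) :=
  pvOuterGo arr i (PySem.List.len arr - 1 - l).toNat l answer

-- body of 'for i in range(len(arr) - 1)': the two while loops, then the rescan of answer
def pvForBody (arr : List Int) (st : List (List Int) × Int) (i : Int) : List (List Int) × Int :=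
  let answer := pvOuter arr i (i + 1) st.1
  (answer, answer.foldl (fun ms a => max (PySem.Int.mod a.sum 10) ms) st.2)

def choose_3 (arr : List Int) : Int :=
  ((PySem.List.pyRange 0 (PySem.List.len arr - 1) 1).foldl (pvForBody arr) ([], 0)).2

-- ===== PORT B =====
-- cnt = {}; for x in arr: cnt[x % 10] = cnt.get(x % 10, 0) + 1
def pvCnt (arr : List Int) : PySem.Dict Int Int :=
  arr.foldl (fun cnt x =>
    cnt.insert (PySem.Int.mod x 10) (cnt.getD (PySem.Int.mod x 10) 0 + 1)) PySem.Dict.empty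

-- all(cnt.get(q, 0) >= rs.count(q) for q in rs), rs = [r1, r2, r3]
def pvOk (cnt : PySem.Dict Int Int) (r1 r2 r3 : Int) : Bool :=
  [r1, r2, r3].all (fun q =>
    decide ((PySem.List.count [r1, r2, r3] q : Int) ≤ cnt.getD q 0))

def choose_3_alt (arr : List Int) : Int :=
  (PySem.List.pyRange 0 10 1).foldl (fun best r1 =>
    (PySem.List.pyRange r1 10 1).foldl (fun best r2 =>
      (PySem.List.pyRange r2 10 1).foldl (fun best r3 =>
        if pvOk (pvCnt arr) r1 r2 r3 then max best (PySem.Int.mod (r1 + r2 + r3) 10)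
        else best) best) best) 0

-- ===== PRECONDITION & SPEC =====
def Spec_choose_3 (arr : List Int) (out : Int) : Prop := out = choose_3_alt arr
instance (arr : List Int) (out : Int) : Decidable (Spec_choose_3 arr out) := by unfold Spec_choose_3; infer_instance

-- ===== CLAIM (what is proved, stated in full; the proofs are below) =====
def Claim_equal_choose_3 : Prop := ∀ (arr : List Int), Dom_choose_3 arr → Spec_choose_3 arr (choose_3 arr)

-- ===== LEMMAS AND PROOFS =====

lemma pvMod10 (a : Int) : PySem.Int.mod a 10 = a % 10 :=
  PySem.Int.mod_eq_emod_of_pos (by norm_num)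

-- generic facts about running-max-shaped folds
lemma pvFold_ge {α : Type} (s : Int → α → Int) (hext : ∀ b x, b ≤ s b x) :
    ∀ (l : List α) (b : Int), b ≤ l.foldl s b := by
  intro l
  induction l with
  | nil => intro b; simp
  | cons x t ih => intro b; exact le_trans (hext b x) (ih (s b x))

lemma pvFold_mem {α : Type} (s : Int → α → Int) (V : Int → Prop) :
    ∀ (l : List α), (∀ b : Int, ∀ x ∈ l, s b x = b ∨ V (s b x)) →
      ∀ b : Int, l.foldl s b = b ∨ V (l.foldl s b) := by
  intro l
  induction l with
  | nil => intro _ b; simp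
  | cons x t ih =>
    intro h b
    have h1 := ih (fun b' y hy => h b' y (List.mem_cons_of_mem _ hy)) (s b x)
    rcases h1 with h1 | h1
    · rcases h b x (by simp) with h2 | h2
      · left; rw [List.foldl_cons, h1, h2]
      · right; rw [List.foldl_cons, h1]; exact h2
    · right; rw [List.foldl_cons]; exact h1

lemma pvFold_ub {α : Type} (s : Int → α → Int) (hext : ∀ b x, b ≤ s b x)
    (v : Int) (x : α) (hv : ∀ b, v ≤ s b x) :
    ∀ (l : List α), x ∈ l → ∀ b : Int, v ≤ l.foldl s b := by
  intro l
  induction l with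
  | nil => intro h; cases h
  | cons y t ih =>
    intro hx b
    rcases List.mem_cons.mp hx with rfl | hx'
    · exact le_trans (hv b) (pvFold_ge s hext t (s b x))
    · exact ih hx' (s b y)

def pvIsMax (S : Int → Prop) (r : Int) : Prop :=
  0 ≤ r ∧ (r = 0 ∨ S r) ∧ ∀ v, S v → v ≤ r

lemma pvIsMax_unique {S T : Int → Prop} (hST : ∀ v, S v ↔ T v) {r1 r2 : Int}
    (h1 : pvIsMax S r1) (h2 : pvIsMax T r2) : r1 = r2 := by
  obtain ⟨h10, h1m, h1u⟩ := h1
  obtain ⟨h20, h2m, h2u⟩ := h2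
  apply le_antisymm
  · rcases h1m with rfl | hs
    · exact h20
    · exact h2u _ ((hST _).mp hs)
  · rcases h2m with rfl | ht
    · exact h10
    · exact h1u _ ((hST _).mpr ht)

-- membership in the answer list built by the while loops
lemma pvInnerGo_mem (arr : List Int) (i l : Int) :
    ∀ (fuel : Nat) (r : Int) (answer : List (List Int)) (x : List Int),
      fuel = (r - l).toNat →
      (x ∈ pvInnerGo arr i l fuel r answer ↔
        x ∈ answer ∨ ∃ r' : Int, l < r' ∧ r' ≤ r ∧ x = pvTriple arr i l r') := by
  intro fuel
  induction fuel with
  | zero =>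
    intro r answer x hf
    simp only [pvInnerGo]
    constructor
    · exact fun h' => Or.inl h'
    · rintro (h' | ⟨r', h1, h2, _⟩)
      · exact h'
      · omega
  | succ f ihf =>
    intro r answer x hf
    have hlr : l < r := by omega
    simp only [pvInnerGo]
    rw [if_neg (by omega : ¬ l = r)]
    rw [ihf (r - 1) _ x (by omega)]
    have hA : x ∈ (if pvTriple arr i l r ∈ answer then answer
        else answer ++ [pvTriple arr i l r]) ↔ x ∈ answer ∨ x = pvTriple arr i l r := by
      split_ifs with hc
      · constructor
        · exact fun h' => Or.inl h'
        · rintro (h' | rfl)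
          · exact h'
          · exact hc
      · simp [List.mem_append]
    rw [hA]
    constructor
    · rintro ((h' | rfl) | ⟨r', ha, hb, hx⟩)
      · exact Or.inl h'
      · exact Or.inr ⟨r, by omega, by omega, rfl⟩
      · exact Or.inr ⟨r', ha, by omega, hx⟩
    · rintro (h' | ⟨r', ha, hb, hx⟩)
      · exact Or.inl (Or.inl h')
      · by_cases hr : r' = r
        · subst hr; exact Or.inl (Or.inr hx)
        · exact Or.inr ⟨r', ha, by omega, hx⟩

lemma pvInner_mem (arr : List Int) (i l r : Int) (answer : List (List Int)) (x : List Int) :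
    x ∈ pvInner arr i l r answer ↔
      x ∈ answer ∨ ∃ r' : Int, l < r' ∧ r' ≤ r ∧ x = pvTriple arr i l r' :=
  pvInnerGo_mem arr i l _ r answer x rfl

lemma pvOuterGo_mem (arr : List Int) (i : Int) :
    ∀ (fuel : Nat) (l : Int) (answer : List (List Int)) (x : List Int),
      fuel = (PySem.List.len arr - 1 - l).toNat →
      (x ∈ pvOuterGo arr i fuel l answer ↔
        x ∈ answer ∨ ∃ l' r' : Int, l ≤ l' ∧ l' < r' ∧ r' ≤ PySem.List.len arr - 1 ∧
          x = pvTriple arr i l' r') := by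
  intro fuel
  induction fuel with
  | zero =>
    intro l answer x hf
    simp only [pvOuterGo]
    constructor
    · exact fun h' => Or.inl h'
    · rintro (h' | ⟨l', r', h1, h2, h3, _⟩)
      · exact h'
      · omega
  | succ f ihf =>
    intro l answer x hf
    have hl : l < PySem.List.len arr - 1 := by omega
    simp only [pvOuterGo]
    rw [if_neg (by omega : ¬ l = PySem.List.len arr - 1)]
    rw [ihf (l + 1) _ x (by omega)]
    rw [pvInner_mem]
    constructor
    · rintro ((h' | ⟨r', ha, hb, hx⟩) | ⟨l', r', ha, hb, hc, hx⟩)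
      · exact Or.inl h'
      · exact Or.inr ⟨l, r', le_refl l, ha, hb, hx⟩
      · exact Or.inr ⟨l', r', by omega, hb, hc, hx⟩
    · rintro (h' | ⟨l', r', ha, hb, hc, hx⟩)
      · exact Or.inl (Or.inl h')
      · by_cases hl' : l' = l
        · subst hl'; exact Or.inl (Or.inr ⟨r', hb, hc, hx⟩)
        · exact Or.inr ⟨l', r', by omega, hb, hc, hx⟩

lemma pvOuter_mem (arr : List Int) (i l : Int) (answer : List (List Int)) (x : List Int) :
    x ∈ pvOuter arr i l answer ↔
      x ∈ answer ∨ ∃ l' r' : Int, l ≤ l' ∧ l' < r' ∧ r' ≤ PySem.List.len arr - 1 ∧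
        x = pvTriple arr i l' r' :=
  pvOuterGo_mem arr i _ l answer x rfl

def pvF (a : List Int) : Int := a.sum % 10

def pvGoodT (arr : List Int) (x : List Int) : Prop :=
  ∃ i j k : Int, 0 ≤ i ∧ i < j ∧ j < k ∧ k ≤ PySem.List.len arr - 1 ∧ x = pvTriple arr i j k

def pvGood (arr : List Int) (v : Int) : Prop := ∃ x, pvGoodT arr x ∧ v = pvF x

-- the per-element step of A's rescan loop, named so folds stay readable
def pvSA (ms : Int) (a : List Int) : Int := max (PySem.Int.mod a.sum 10) ms

lemma pvForBody_eq (arr : List Int) (st : List (List Int) × Int) (i : Int) :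
    pvForBody arr st i =
      (pvOuter arr i (i + 1) st.1, (pvOuter arr i (i + 1) st.1).foldl pvSA st.2) := rfl

lemma pvSA_ext : ∀ (b : Int) (a : List Int), b ≤ pvSA b a :=
  fun _ _ => le_max_right _ _

lemma pvSA_choice (b : Int) (a : List Int) : pvSA b a = b ∨ pvSA b a = pvF a := by
  unfold pvSA pvF
  rw [pvMod10]
  rcases max_choice (a.sum % 10) b with h | h
  · exact Or.inr h
  · exact Or.inl h

lemma pvF_le_pvSA (a : List Int) (b : Int) : pvF a ≤ pvSA b a := by
  unfold pvSA pvF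
  rw [pvMod10]
  exact le_max_left _ _

lemma pvFoldA (arr : List Int) :
    ∀ (is : List Int) (st : List (List Int) × Int),
      (∀ i ∈ is, 0 ≤ i) →
      (∀ x ∈ st.1, pvGoodT arr x) → 0 ≤ st.2 → (st.2 = 0 ∨ pvGood arr st.2) →
      (∀ x ∈ (is.foldl (pvForBody arr) st).1, pvGoodT arr x) ∧
      0 ≤ (is.foldl (pvForBody arr) st).2 ∧
      ((is.foldl (pvForBody arr) st).2 = 0 ∨ pvGood arr (is.foldl (pvForBody arr) st).2) ∧
      st.2 ≤ (is.foldl (pvForBody arr) st).2 ∧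
      (∀ i ∈ is, ∀ j k : Int, i < j → j < k → k ≤ PySem.List.len arr - 1 →
        pvF (pvTriple arr i j k) ≤ (is.foldl (pvForBody arr) st).2) := by
  intro is
  induction is with
  | nil =>
    intro st _ h1 h2 h3
    refine ⟨h1, h2, h3, le_refl _, ?_⟩
    intro i hi; cases hi
  | cons i t ih =>
    intro st his h1 h2 h3
    have hi0 : 0 ≤ i := his i (by simp)
    have hbody := pvForBody_eq arr st i
    have hmem1 : ∀ x ∈ (pvForBody arr st i).1, pvGoodT arr x := by
      intro x hx
      rw [hbody] at hx
      rcases (pvOuter_mem arr i (i + 1) st.1 x).mp hx with h' | ⟨l', r', ha, hb, hc, hx'⟩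
      · exact h1 x h'
      · exact ⟨i, l', r', hi0, by omega, hb, hc, hx'⟩
    have h2' : 0 ≤ (pvForBody arr st i).2 := by
      rw [hbody]
      exact le_trans h2 (pvFold_ge pvSA pvSA_ext _ _)
    have h3' : (pvForBody arr st i).2 = 0 ∨ pvGood arr (pvForBody arr st i).2 := by
      rw [hbody]
      have hstep : ∀ b : Int, ∀ a ∈ pvOuter arr i (i + 1) st.1,
          pvSA b a = b ∨ pvGood arr (pvSA b a) := by
        intro b a ha
        rcases pvSA_choice b a with h' | h'
        · exact Or.inl h'
        · right
          rw [h']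
          exact ⟨a, hmem1 a (by rw [hbody]; exact ha), rfl⟩
      rcases pvFold_mem pvSA (pvGood arr) (pvOuter arr i (i + 1) st.1) hstep st.2 with h' | h'
      · rw [h']; exact h3
      · exact Or.inr h'
    have h4' : st.2 ≤ (pvForBody arr st i).2 := by
      rw [hbody]
      exact pvFold_ge pvSA pvSA_ext _ _
    obtain ⟨c1, c2, c3, c4, c5⟩ :=
      ih (pvForBody arr st i) (fun j hj => his j (by simp [hj])) hmem1 h2' h3'
    refine ⟨c1, c2, c3, le_trans h4' c4, ?_⟩
    intro i' hi' j k hij hjk hk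
    rcases List.mem_cons.mp hi' with rfl | hi'
    · -- the triple is collected during iteration i'
      have htr : pvTriple arr i' j k ∈ pvOuter arr i' (i' + 1) st.1 :=
        (pvOuter_mem arr i' (i' + 1) st.1 _).mpr
          (Or.inr ⟨j, k, by omega, hjk, hk, rfl⟩)
      have hle : pvF (pvTriple arr i' j k) ≤ (pvForBody arr st i').2 := by
        rw [pvForBody_eq arr st i']
        exact pvFold_ub pvSA pvSA_ext _ (pvTriple arr i' j k)
          (fun b => pvF_le_pvSA _ b) _ htr st.2
      exact le_trans hle c4
    · exact c5 i' hi' j k hij hjk hk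

lemma pvA_isMax (arr : List Int) : pvIsMax (pvGood arr) (choose_3 arr) := by
  unfold choose_3
  have h := pvFoldA arr (PySem.List.pyRange 0 (PySem.List.len arr - 1) 1) ([], 0)
    (by intro i hi; have := PySem.List.mem_pyRange_one.mp hi; omega)
    (by intro x hx; cases hx) (le_refl 0) (Or.inl rfl)
  refine ⟨h.2.1, h.2.2.1, ?_⟩
  rintro v ⟨x, ⟨i, j, k, h0, hij, hjk, hk, rfl⟩, rfl⟩
  apply h.2.2.2.2 i ?_ j k hij hjk hk
  exact PySem.List.mem_pyRange_one.mpr ⟨h0, by omega⟩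

-- ===== B-side characterization =====
lemma pvCnt_getD (arr : List Int) (q : Int) :
    (pvCnt arr).getD q 0 = ((arr.map (fun x => x % 10)).count q : Int) := by
  unfold pvCnt
  simp only [pvMod10]
  rw [← List.foldl_map (f := fun x : Int => x % 10)
      (g := fun (d : PySem.Dict Int Int) x => d.insert x (d.getD x 0 + 1))]
  rw [PySem.Dict.getD_foldl_insert_add_one]
  simp [PySem.Dict.getD_empty]

lemma pvOk_iff (cnt : PySem.Dict Int Int) (r1 r2 r3 : Int) :
    pvOk cnt r1 r2 r3 = true ↔
      ∀ q ∈ [r1, r2, r3], (List.count q [r1, r2, r3] : Int) ≤ cnt.getD q 0 := by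
  unfold pvOk
  simp [PySem.List.count_eq]

def pvGoodR (arr : List Int) (v : Int) : Prop :=
  ∃ r1 r2 r3 : Int, 0 ≤ r1 ∧ r1 ≤ r2 ∧ r2 ≤ r3 ∧ r3 < 10 ∧
    pvOk (pvCnt arr) r1 r2 r3 = true ∧ v = (r1 + r2 + r3) % 10

-- named step functions of B's three nested loops
def pvS3 (arr : List Int) (r1 r2 best r3 : Int) : Int :=
  if pvOk (pvCnt arr) r1 r2 r3 then max best (PySem.Int.mod (r1 + r2 + r3) 10) else best

def pvS2 (arr : List Int) (r1 best r2 : Int) : Int :=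
  (PySem.List.pyRange r2 10 1).foldl (pvS3 arr r1 r2) best

def pvS1 (arr : List Int) (best r1 : Int) : Int :=
  (PySem.List.pyRange r1 10 1).foldl (pvS2 arr r1) best

lemma pvAlt_eq (arr : List Int) :
    choose_3_alt arr = (PySem.List.pyRange 0 10 1).foldl (pvS1 arr) 0 := rfl

lemma pvS3_ext (arr : List Int) (r1 r2 : Int) : ∀ b r3, b ≤ pvS3 arr r1 r2 b r3 := by
  intro b r3
  unfold pvS3
  split_ifs
  · exact le_max_left _ _
  · exact le_refl _

lemma pvS2_ext (arr : List Int) (r1 : Int) : ∀ b r2, b ≤ pvS2 arr r1 b r2 := by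
  intro b r2
  unfold pvS2
  exact pvFold_ge _ (pvS3_ext arr r1 r2) _ _

lemma pvS1_ext (arr : List Int) : ∀ b r1, b ≤ pvS1 arr b r1 := by
  intro b r1
  unfold pvS1
  exact pvFold_ge _ (pvS2_ext arr r1) _ _

lemma pvB_isMax (arr : List Int) : pvIsMax (pvGoodR arr) (choose_3_alt arr) := by
  rw [pvAlt_eq]
  refine ⟨pvFold_ge _ (pvS1_ext arr) _ 0, ?_, ?_⟩
  · -- the result is 0 or a feasible residue-triple value
    apply pvFold_mem (pvS1 arr) (pvGoodR arr)
    intro b r1 hr1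
    have hb1 := PySem.List.mem_pyRange_one.mp hr1
    unfold pvS1
    apply pvFold_mem (pvS2 arr r1) (pvGoodR arr)
    intro b' r2 hr2
    have hb2 := PySem.List.mem_pyRange_one.mp hr2
    unfold pvS2
    apply pvFold_mem (pvS3 arr r1 r2) (pvGoodR arr)
    intro b'' r3 hr3
    have hb3 := PySem.List.mem_pyRange_one.mp hr3
    unfold pvS3
    by_cases hok : pvOk (pvCnt arr) r1 r2 r3 = true
    · rw [if_pos hok]
      rcases max_choice b'' (PySem.Int.mod (r1 + r2 + r3) 10) with hmc | hmc
      · left; rw [hmc]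
      · right
        rw [hmc, pvMod10]
        exact ⟨r1, r2, r3, hb1.1, hb2.1, hb3.1, hb3.2, hok, rfl⟩
    · left; rw [if_neg hok]
  · rintro v ⟨r1, r2, r3, h01, h12, h23, h310, hok, rfl⟩
    refine pvFold_ub (pvS1 arr) (pvS1_ext arr) _ r1 (fun b => ?_) _
      (PySem.List.mem_pyRange_one.mpr ⟨h01, by omega⟩) 0
    unfold pvS1
    refine pvFold_ub (pvS2 arr r1) (pvS2_ext arr r1) _ r2 (fun b' => ?_) _
      (PySem.List.mem_pyRange_one.mpr ⟨h12, by omega⟩) b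
    unfold pvS2
    refine pvFold_ub (pvS3 arr r1 r2) (pvS3_ext arr r1 r2) _ r3 (fun b'' => ?_) _
      (PySem.List.mem_pyRange_one.mpr ⟨h23, h310⟩) b'
    unfold pvS3
    rw [if_pos hok, pvMod10]
    exact le_max_right _ _

-- ===== counting / index-picking lemmas =====
lemma pvCount3 (x y z q : Int) :
    List.count q [x, y, z] =
      (if x = q then 1 else 0) + (if y = q then 1 else 0) + (if z = q then 1 else 0) := by
  simp [List.count_cons]
  split_ifs <;> omega

lemma pvCount_ge_one (L : List Int) (a : Nat) (ha : a < L.length) (q : Int)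
    (hq : L.getD a 0 = q) : 1 ≤ L.count q := by
  have hmem : q ∈ L := by
    rw [← hq, List.getD_eq_getElem L 0 ha]
    exact List.getElem_mem ha
  exact List.count_pos_iff.mpr hmem

lemma pvCount_ge_two (L : List Int) (a b : Nat) (hab : a < b) (hb : b < L.length) (q : Int)
    (ha' : L.getD a 0 = q) (hb' : L.getD b 0 = q) : 2 ≤ L.count q := by
  induction L generalizing a b with
  | nil => simp at hb
  | cons x t ih =>
    cases a with
    | zero =>
      cases b with
      | zero => omega
      | succ b' =>
        have hx : x = q := by simpa using ha'
        subst hx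
        have h1 : 1 ≤ t.count x :=
          pvCount_ge_one t b' (by simpa using hb) x (by simpa using hb')
        rw [List.count_cons_self]
        omega
    | succ a' =>
      cases b with
      | zero => omega
      | succ b' =>
        have hrec := ih a' b' (by omega) (by simpa using hb) (by simpa using ha')
          (by simpa using hb')
        rw [List.count_cons]
        omega

lemma pvCount_ge_three (L : List Int) (a b c : Nat) (hab : a < b) (hbc : b < c)
    (hc : c < L.length) (q : Int)
    (ha' : L.getD a 0 = q) (hb' : L.getD b 0 = q) (hc' : L.getD c 0 = q) : 3 ≤ L.count q := by
  induction L generalizing a b c with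
  | nil => simp at hc
  | cons x t ih =>
    cases a with
    | zero =>
      cases b with
      | zero => omega
      | succ b' =>
        cases c with
        | zero => omega
        | succ c' =>
          have hx : x = q := by simpa using ha'
          subst hx
          have h2 : 2 ≤ t.count x :=
            pvCount_ge_two t b' c' (by omega) (by simpa using hc)
              x (by simpa using hb') (by simpa using hc')
          rw [List.count_cons_self]
          omega
    | succ a' =>
      cases b with
      | zero => omega
      | succ b' =>
        cases c with
        | zero => omega
        | succ c' =>
          have hrec := ih a' b' c' (by omega) (by omega) (by simpa using hc)
            (by simpa using ha') (by simpa using hb') (by simpa using hc')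
          rw [List.count_cons]
          omega

lemma pvEx_one (L : List Int) (q : Int) (h : 1 ≤ L.count q) :
    ∃ a, a < L.length ∧ L.getD a 0 = q := by
  have hmem : q ∈ L := List.count_pos_iff.mp (by omega)
  obtain ⟨a, ha, hEq⟩ := List.mem_iff_getElem.mp hmem
  exact ⟨a, ha, by rw [List.getD_eq_getElem L 0 ha]; exact hEq⟩

lemma pvEx_two (L : List Int) (q : Int) (h : 2 ≤ L.count q) :
    ∃ a b, a < b ∧ b < L.length ∧ L.getD a 0 = q ∧ L.getD b 0 = q := by
  induction L with
  | nil => simp at h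
  | cons x t ih =>
    by_cases hx : x = q
    · subst hx
      rw [List.count_cons_self] at h
      obtain ⟨a, ha, haq⟩ := pvEx_one t x (by omega)
      exact ⟨0, a + 1, by omega, by simpa using ha, by simp, by simpa using haq⟩
    · rw [List.count_cons_of_ne hx] at h
      obtain ⟨a, b, hab, hb, h1, h2'⟩ := ih h
      exact ⟨a + 1, b + 1, by omega, by simpa using hb, by simpa using h1, by simpa using h2'⟩

lemma pvEx_three (L : List Int) (q : Int) (h : 3 ≤ L.count q) :
    ∃ a b c, a < b ∧ b < c ∧ c < L.length ∧
      L.getD a 0 = q ∧ L.getD b 0 = q ∧ L.getD c 0 = q := by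
  induction L with
  | nil => simp at h
  | cons x t ih =>
    by_cases hx : x = q
    · subst hx
      rw [List.count_cons_self] at h
      obtain ⟨a, b, hab, hb, h1, h2'⟩ := pvEx_two t x (by omega)
      exact ⟨0, a + 1, b + 1, by omega, by omega, by simpa using hb, by simp,
        by simpa using h1, by simpa using h2'⟩
    · rw [List.count_cons_of_ne hx] at h
      obtain ⟨a, b, c, hab, hbc, hc, h1, h2', h3'⟩ := ih h
      exact ⟨a + 1, b + 1, c + 1, by omega, by omega, by simpa using hc,
        by simpa using h1, by simpa using h2', by simpa using h3'⟩

-- ===== bridge between the two characterizations =====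
def pvGoodN (arr : List Int) (v : Int) : Prop :=
  ∃ a b c : Nat, a < b ∧ b < c ∧ c < arr.length ∧
    v = (arr.getD a 0 + arr.getD b 0 + arr.getD c 0) % 10

lemma pvElem_eq (arr : List Int) (i : Int) (h0 : 0 ≤ i) (h1 : i < (arr.length : Int)) :
    pvElem arr i = arr.getD i.toNat 0 := by
  unfold pvElem
  rw [PySem.List.pyGet?_of_nonneg arr h0, List.getD_eq_getElem?_getD]

lemma pvF_triple (arr : List Int) (i j k : Int) :
    pvF (pvTriple arr i j k) = (pvElem arr i + pvElem arr j + pvElem arr k) % 10 := by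
  simp [pvF, pvTriple, add_assoc]

lemma pvGood_iff_GoodN (arr : List Int) (v : Int) : pvGood arr v ↔ pvGoodN arr v := by
  have hlen : PySem.List.len arr = (arr.length : Int) := PySem.List.len_eq arr
  constructor
  · rintro ⟨x, ⟨i, j, k, h0, hij, hjk, hk, rfl⟩, rfl⟩
    rw [hlen] at hk
    refine ⟨i.toNat, j.toNat, k.toNat, by omega, by omega, by omega, ?_⟩
    rw [pvF_triple, pvElem_eq _ _ h0 (by omega), pvElem_eq _ _ (by omega) (by omega),
      pvElem_eq _ _ (by omega) (by omega)]
  · rintro ⟨a, b, c, hab, hbc, hc, rfl⟩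
    refine ⟨pvTriple arr (a : Int) (b : Int) (c : Int),
      ⟨(a : Int), (b : Int), (c : Int), by omega, by omega, by omega,
        by rw [hlen]; omega, rfl⟩, ?_⟩
    rw [pvF_triple, pvElem_eq _ _ (by omega) (by omega),
      pvElem_eq _ _ (by omega) (by omega), pvElem_eq _ _ (by omega) (by omega)]
    simp

lemma pvR_getD (arr : List Int) (a : Nat) (ha : a < arr.length) :
    (arr.map (fun x => x % 10)).getD a 0 = arr.getD a 0 % 10 := by
  rw [List.getD_eq_getElem _ 0 (by simpa using ha), List.getElem_map,
    List.getD_eq_getElem arr 0 ha]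

lemma pvSort3 (q1 q2 q3 : Int) :
    ∃ r1 r2 r3 : Int, r1 ≤ r2 ∧ r2 ≤ r3 ∧ [r1, r2, r3].Perm [q1, q2, q3] := by
  rcases le_total q1 q2 with h12 | h12 <;> rcases le_total q2 q3 with h23 | h23 <;>
    rcases le_total q1 q3 with h13 | h13
  · exact ⟨q1, q2, q3, h12, h23, List.Perm.refl _⟩
  · exact ⟨q1, q2, q3, h12, h23, List.Perm.refl _⟩
  · exact ⟨q1, q3, q2, h13, h23, List.Perm.cons q1 (List.Perm.swap q2 q3 [])⟩
  · exact ⟨q3, q1, q2, h13, h12,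
      (List.Perm.swap q1 q3 [q2]).trans (List.Perm.cons q1 (List.Perm.swap q2 q3 []))⟩
  · exact ⟨q2, q1, q3, h12, h13, List.Perm.swap q1 q2 [q3]⟩
  · exact ⟨q2, q3, q1, h23, h13,
      (List.Perm.cons q2 (List.Perm.swap q1 q3 [])).trans (List.Perm.swap q1 q2 [q3])⟩
  · exact ⟨q3, q2, q1, h23, h12,
      (List.Perm.cons q3 (List.Perm.swap q1 q2 [])).trans
        ((List.Perm.swap q1 q3 [q2]).trans (List.Perm.cons q1 (List.Perm.swap q2 q3 [])))⟩
  · exact ⟨q3, q2, q1, h23, h12,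
      (List.Perm.cons q3 (List.Perm.swap q1 q2 [])).trans
        ((List.Perm.swap q1 q3 [q2]).trans (List.Perm.cons q1 (List.Perm.swap q2 q3 [])))⟩

lemma pvCount_le (arr : List Int) (a b c : Nat) (hab : a < b) (hbc : b < c)
    (hc : c < arr.length) (q : Int) :
    List.count q [arr.getD a 0 % 10, arr.getD b 0 % 10, arr.getD c 0 % 10] ≤
      (arr.map (fun x => x % 10)).count q := by
  have hlen : (arr.map (fun x => x % 10)).length = arr.length := by simp
  have hga : (arr.map (fun x => x % 10)).getD a 0 = arr.getD a 0 % 10 := pvR_getD arr a (by omega)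
  have hgb : (arr.map (fun x => x % 10)).getD b 0 = arr.getD b 0 % 10 := pvR_getD arr b (by omega)
  have hgc : (arr.map (fun x => x % 10)).getD c 0 = arr.getD c 0 % 10 := pvR_getD arr c hc
  rw [pvCount3]
  by_cases h1 : arr.getD a 0 % 10 = q <;> by_cases h2 : arr.getD b 0 % 10 = q <;>
    by_cases h3 : arr.getD c 0 % 10 = q
  · have := pvCount_ge_three (arr.map (fun x => x % 10)) a b c hab hbc (by omega) q
      (hga.trans h1) (hgb.trans h2) (hgc.trans h3)
    rw [if_pos h1, if_pos h2, if_pos h3]; omega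
  · have := pvCount_ge_two (arr.map (fun x => x % 10)) a b hab (by omega) q
      (hga.trans h1) (hgb.trans h2)
    rw [if_pos h1, if_pos h2, if_neg h3]; omega
  · have := pvCount_ge_two (arr.map (fun x => x % 10)) a c (by omega) (by omega) q
      (hga.trans h1) (hgc.trans h3)
    rw [if_pos h1, if_neg h2, if_pos h3]; omega
  · have := pvCount_ge_one (arr.map (fun x => x % 10)) a (by omega) q (hga.trans h1)
    rw [if_pos h1, if_neg h2, if_neg h3]; omega
  · have := pvCount_ge_two (arr.map (fun x => x % 10)) b c hbc (by omega) q
      (hgb.trans h2) (hgc.trans h3)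
    rw [if_neg h1, if_pos h2, if_pos h3]; omega
  · have := pvCount_ge_one (arr.map (fun x => x % 10)) b (by omega) q (hgb.trans h2)
    rw [if_neg h1, if_pos h2, if_neg h3]; omega
  · have := pvCount_ge_one (arr.map (fun x => x % 10)) c (by omega) q (hgc.trans h3)
    rw [if_neg h1, if_neg h2, if_pos h3]; omega
  · rw [if_neg h1, if_neg h2, if_neg h3]; omega

lemma pvGoodN_to_GoodR (arr : List Int) (v : Int) : pvGoodN arr v → pvGoodR arr v := by
  rintro ⟨a, b, c, hab, hbc, hc, rfl⟩
  obtain ⟨r1, r2, r3, h12, h23, hperm⟩ :=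
    pvSort3 (arr.getD a 0 % 10) (arr.getD b 0 % 10) (arr.getD c 0 % 10)
  have hr1mem := hperm.mem_iff.mp (show r1 ∈ [r1, r2, r3] by simp)
  have hr3mem := hperm.mem_iff.mp (show r3 ∈ [r1, r2, r3] by simp)
  simp only [List.mem_cons, List.not_mem_nil, or_false] at hr1mem hr3mem
  have hr1pos : 0 ≤ r1 := by rcases hr1mem with h | h | h <;> subst h <;> omega
  have hr3lt : r3 < 10 := by rcases hr3mem with h | h | h <;> subst h <;> omega
  have hs := hperm.sum_eq
  simp only [List.sum_cons, List.sum_nil] at hs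
  refine ⟨r1, r2, r3, hr1pos, h12, h23, hr3lt, ?_, ?_⟩
  · rw [pvOk_iff]
    intro q hq
    rw [pvCnt_getD]
    have hcq := hperm.count_eq q
    rw [hcq]
    exact_mod_cast pvCount_le arr a b c hab hbc hc q
  · omega

lemma pvGoodN_of_three (arr : List Int) (a b c : Nat) (hab : a ≠ b) (hac : a ≠ c) (hbc : b ≠ c)
    (ha : a < arr.length) (hb : b < arr.length) (hc : c < arr.length) :
    pvGoodN arr ((arr.getD a 0 + arr.getD b 0 + arr.getD c 0) % 10) := by
  rcases Nat.lt_or_ge a b with h1 | h1 <;> rcases Nat.lt_or_ge b c with h2 | h2 <;>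
    rcases Nat.lt_or_ge a c with h3 | h3
  · exact ⟨a, b, c, h1, h2, hc, rfl⟩
  · exact ⟨c, a, b, by omega, by omega, hb, by omega⟩
  · exact ⟨a, c, b, by omega, by omega, hb, by omega⟩
  · exact ⟨c, a, b, by omega, by omega, hb, by omega⟩
  · exact ⟨b, a, c, by omega, by omega, hc, by omega⟩
  · exact ⟨b, c, a, by omega, by omega, ha, by omega⟩
  · omega
  · exact ⟨c, b, a, by omega, by omega, ha, by omega⟩

lemma pvGoodR_to_GoodN (arr : List Int) (v : Int) : pvGoodR arr v → pvGoodN arr v := by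
  rintro ⟨r1, r2, r3, h0, h12, h23, h10, hok, rfl⟩
  rw [pvOk_iff] at hok
  have hcnt : ∀ q ∈ [r1, r2, r3],
      (List.count q [r1, r2, r3] : Int) ≤ ((arr.map (fun x => x % 10)).count q : Int) := by
    intro q hq
    have := hok q hq
    rwa [pvCnt_getD] at this
  have hRlen : (arr.map (fun x => x % 10)).length = arr.length := by simp
  by_cases hA : r1 = r3
  · -- all three residues equal
    have hcount : List.count r1 [r1, r2, r3] = 3 := by
      rw [pvCount3, if_pos rfl, if_pos (by omega), if_pos (by omega)]
    have h3 : (3 : Nat) ≤ (arr.map (fun x => x % 10)).count r1 := by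
      have := hcnt r1 (by simp)
      rw [hcount] at this
      exact_mod_cast this
    obtain ⟨a, b, c, hab, hbc, hc, ga, gb, gc⟩ := pvEx_three _ r1 h3
    rw [pvR_getD arr a (by omega)] at ga
    rw [pvR_getD arr b (by omega)] at gb
    rw [pvR_getD arr c (by omega)] at gc
    exact ⟨a, b, c, hab, hbc, by omega, by omega⟩
  · by_cases hB : r1 = r2
    · -- r1 = r2 < r3
      have hcount1 : List.count r1 [r1, r2, r3] = 2 := by
        rw [pvCount3, if_pos rfl, if_pos (by omega), if_neg (by omega)]
      have hcount3 : List.count r3 [r1, r2, r3] = 1 := by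
        rw [pvCount3, if_neg (by omega), if_neg (by omega), if_pos rfl]
      have h2 : (2 : Nat) ≤ (arr.map (fun x => x % 10)).count r1 := by
        have := hcnt r1 (by simp); rw [hcount1] at this; exact_mod_cast this
      have h1 : (1 : Nat) ≤ (arr.map (fun x => x % 10)).count r3 := by
        have := hcnt r3 (by simp); rw [hcount3] at this; exact_mod_cast this
      obtain ⟨a, b, hab, hb, ga, gb⟩ := pvEx_two _ r1 h2
      obtain ⟨c, hc, gc⟩ := pvEx_one _ r3 h1
      have hca : c ≠ a := by intro h; rw [h, ga] at gc; omega
      have hcb : c ≠ b := by intro h; rw [h, gb] at gc; omega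
      rw [pvR_getD arr a (by omega)] at ga
      rw [pvR_getD arr b (by omega)] at gb
      rw [pvR_getD arr c (by omega)] at gc
      have hv : (r1 + r2 + r3) % 10 =
          (arr.getD a 0 + arr.getD b 0 + arr.getD c 0) % 10 := by omega
      rw [hv]
      exact pvGoodN_of_three arr a b c (by omega) (Ne.symm hca) (Ne.symm hcb)
        (by omega) (by omega) (by omega)
    · by_cases hC : r2 = r3
      · -- r1 < r2 = r3
        have hcount2 : List.count r2 [r1, r2, r3] = 2 := by
          rw [pvCount3, if_neg (by omega), if_pos rfl, if_pos (by omega)]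
        have hcount1 : List.count r1 [r1, r2, r3] = 1 := by
          rw [pvCount3, if_pos rfl, if_neg (by omega), if_neg (by omega)]
        have h2 : (2 : Nat) ≤ (arr.map (fun x => x % 10)).count r2 := by
          have := hcnt r2 (by simp); rw [hcount2] at this; exact_mod_cast this
        have h1 : (1 : Nat) ≤ (arr.map (fun x => x % 10)).count r1 := by
          have := hcnt r1 (by simp); rw [hcount1] at this; exact_mod_cast this
        obtain ⟨a, b, hab, hb, ga, gb⟩ := pvEx_two _ r2 h2
        obtain ⟨c, hc, gc⟩ := pvEx_one _ r1 h1
        have hca : c ≠ a := by intro h; rw [h, ga] at gc; omega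
        have hcb : c ≠ b := by intro h; rw [h, gb] at gc; omega
        rw [pvR_getD arr a (by omega)] at ga
        rw [pvR_getD arr b (by omega)] at gb
        rw [pvR_getD arr c (by omega)] at gc
        have hv : (r1 + r2 + r3) % 10 =
            (arr.getD c 0 + arr.getD a 0 + arr.getD b 0) % 10 := by omega
        rw [hv]
        exact pvGoodN_of_three arr c a b hca hcb (by omega) (by omega) (by omega) (by omega)
      · -- r1 < r2 < r3, all distinct
        have hcount1 : List.count r1 [r1, r2, r3] = 1 := by
          rw [pvCount3, if_pos rfl, if_neg (by omega), if_neg (by omega)]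
        have hcount2 : List.count r2 [r1, r2, r3] = 1 := by
          rw [pvCount3, if_neg (by omega), if_pos rfl, if_neg (by omega)]
        have hcount3 : List.count r3 [r1, r2, r3] = 1 := by
          rw [pvCount3, if_neg (by omega), if_neg (by omega), if_pos rfl]
        have g1 : (1 : Nat) ≤ (arr.map (fun x => x % 10)).count r1 := by
          have := hcnt r1 (by simp); rw [hcount1] at this; exact_mod_cast this
        have g2 : (1 : Nat) ≤ (arr.map (fun x => x % 10)).count r2 := by
          have := hcnt r2 (by simp); rw [hcount2] at this; exact_mod_cast this
        have g3 : (1 : Nat) ≤ (arr.map (fun x => x % 10)).count r3 := by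
          have := hcnt r3 (by simp); rw [hcount3] at this; exact_mod_cast this
        obtain ⟨a, ha, ga⟩ := pvEx_one _ r1 g1
        obtain ⟨b, hb, gb⟩ := pvEx_one _ r2 g2
        obtain ⟨c, hc, gc⟩ := pvEx_one _ r3 g3
        have hab : a ≠ b := by intro h; rw [h, gb] at ga; omega
        have hac : a ≠ c := by intro h; rw [h, gc] at ga; omega
        have hbc : b ≠ c := by intro h; rw [h, gc] at gb; omega
        rw [pvR_getD arr a (by omega)] at ga
        rw [pvR_getD arr b (by omega)] at gb
        rw [pvR_getD arr c (by omega)] at gc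
        have hv : (r1 + r2 + r3) % 10 =
            (arr.getD a 0 + arr.getD b 0 + arr.getD c 0) % 10 := by omega
        rw [hv]
        exact pvGoodN_of_three arr a b c hab hac hbc (by omega) (by omega) (by omega)

-- ===== VERDICT (by name: the statement is the Claim_ definition above) =====
theorem choose_3_spec : Claim_equal_choose_3 := by
  intro arr _
  unfold Spec_choose_3
  exact pvIsMax_unique
    (fun v => (pvGood_iff_GoodN arr v).trans
      ⟨pvGoodN_to_GoodR arr v, pvGoodR_to_GoodN arr v⟩)
    (pvA_isMax arr) (pvB_isMax arr)
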